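-- pv_equiv track=rewrite | github.com/tobiasleibrock/token-terminator | backend/services/prompt_trimmer.py | find_non_overlapping_chunks
-- ===== SOURCE A (Python) =====
-- from typing import Optional, List, Tuple
--
-- def find_non_overlapping_chunks(
--     chunks: List[Tuple[str, List[int], int]]
-- ) -> List[Tuple[str, List[int], int]]:
--     """
--     Filter out chunks that are part of larger chunks
--     """
--     if not chunks:
--         return []
--
--     filtered_chunks = []
--     used_positions = set()
--
--     for chunk, positions, occurrences in chunks:
--         chunk_positions = set(range(pos, pos + len(chunk)) for pos in positions)
--         if not any(
--             pos in used_positions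
--             for positions_set in chunk_positions
--             for pos in positions_set
--         ):
--             filtered_chunks.append((chunk, positions, occurrences))
--             used_positions.update(
--                 pos for positions_set in chunk_positions for pos in positions_set
--             )
--
--     return filtered_chunks
-- ===== SOURCE B (Python) =====
-- from typing import List, Tuple
--
-- def _covered(used, p, q):
--     # used is a sorted list of disjoint non-touching half-open intervals;
--     # does [p, q) (with p < q) intersect any of them?
--     for a, b in used:
--         if q <= a:
--             return False
--         if p < b:
--             return True
--     return False
--
-- def _add(used, p, q):
--     # insert [p, q) into the sorted disjoint interval list, merging overlaps
--     out = []
--     i = 0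
--     while i < len(used) and used[i][1] < p:
--         out.append(used[i])
--         i += 1
--     while i < len(used) and used[i][0] <= q:
--         p = min(p, used[i][0])
--         q = max(q, used[i][1])
--         i += 1
--     out.append((p, q))
--     out.extend(used[i:])
--     return out
--
-- def find_non_overlapping_chunks(
--     chunks: List[Tuple[str, List[int], int]]
-- ) -> List[Tuple[str, List[int], int]]:
--     """Sorted merged disjoint intervals instead of a set of every covered
--     position: overlap is decided by an early-exiting scan of the interval
--     chain and accepted occurrences are merged into it, so cost is independent
--     of chunk length."""
--     kept = []
--     used = []  # sorted, disjoint, non-touching half-open intervals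
--     for chunk, positions, occurrences in chunks:
--         n = len(chunk)
--         if n > 0 and any(_covered(used, p, p + n) for p in positions):
--             continue
--         kept.append((chunk, positions, occurrences))
--         if n > 0:
--             for p in positions:
--                 used = _add(used, p, p + n)
--     return kept
-- ===== Notes on version B (the rewrite author's own statement) =====
-- stated objective: faster
-- what changed: B replaces A's set of every covered integer position by a sorted list of merged disjoint half-open intervals: overlap is decided by an early-exiting scan of the interval chain and accepted occurrences are merge-inserted, so no per-position set is ever materialised and cost is independent of chunk length.
import Mathlib
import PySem

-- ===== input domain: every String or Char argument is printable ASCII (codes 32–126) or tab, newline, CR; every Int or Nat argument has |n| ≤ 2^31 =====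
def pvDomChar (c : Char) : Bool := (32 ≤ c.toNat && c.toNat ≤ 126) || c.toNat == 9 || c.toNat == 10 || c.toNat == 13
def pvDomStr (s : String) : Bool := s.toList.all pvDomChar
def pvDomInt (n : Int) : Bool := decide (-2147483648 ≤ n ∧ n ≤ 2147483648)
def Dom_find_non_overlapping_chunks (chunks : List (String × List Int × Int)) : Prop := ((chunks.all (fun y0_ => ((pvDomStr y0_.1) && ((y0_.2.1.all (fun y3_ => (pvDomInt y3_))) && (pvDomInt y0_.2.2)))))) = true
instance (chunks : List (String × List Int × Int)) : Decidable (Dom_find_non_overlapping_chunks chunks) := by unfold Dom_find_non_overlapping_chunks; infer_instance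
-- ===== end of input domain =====

-- B replaces A's set of every covered integer position by a sorted chain of merged
-- disjoint half-open intervals (early-exit overlap scan, merge-insert on accept).

-- ===== PORT A =====
-- one loop iteration of A: state = (filtered_chunks, used_positions : set of ints)
def pvAStep (st : List (String × List Int × Int) × PySem.Set Int)
    (c : String × List Int × Int) : List (String × List Int × Int) × PySem.Set Int :=
  let chunk := c.1; let positions := c.2.1; let occurrences := c.2.2
  -- chunk_positions = set(range(pos, pos + len(chunk)) for pos in positions)
  let chunkPositions : PySem.Set (List Int) :=
    PySem.Set.ofList (positions.map (fun pos => PySem.List.pyRange pos (pos + PySem.Str.len chunk) 1))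
  if chunkPositions.any (fun ps => ps.any (fun pos => PySem.Set.contains st.2 pos)) then st
  else (st.1 ++ [(chunk, positions, occurrences)], PySem.Set.update st.2 chunkPositions.flatten)

def find_non_overlapping_chunks (chunks : List (String × List Int × Int)) : List (String × List Int × Int) :=
  if chunks = [] then []
  else (chunks.foldl pvAStep ([], PySem.Set.empty)).1

-- ===== PORT B =====
-- _covered: early-exiting scan of the sorted disjoint interval list (each early
-- return of the Python for-loop is a branch of the recursion)
def pvCovered : List (Int × Int) → Int → Int → Bool
  | [], _, _ => false
  | (a, b) :: t, p, q => if q ≤ a then false else if p < b then true else pvCovered t p q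

-- second while-loop of _add: merge all intervals whose start is ≤ q into [p, q)
def pvAddMerge : List (Int × Int) → Int → Int → List (Int × Int)
  | [], p, q => [(p, q)]
  | (a, b) :: t, p, q => if a ≤ q then pvAddMerge t (min p a) (max q b) else (p, q) :: (a, b) :: t

-- first while-loop of _add: copy the intervals that end strictly before p
def pvAddSkip : List (Int × Int) → Int → Int → List (Int × Int)
  | [], p, q => [(p, q)]
  | (a, b) :: t, p, q => if b < p then (a, b) :: pvAddSkip t p q else pvAddMerge ((a, b) :: t) p q

-- main loop of B: kept.append becomes consing the emitted element, `used` is the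
-- carried state (the two inner loops of the Python are the helpers above)
def pvBGo : List (String × List Int × Int) → List (Int × Int) → List (String × List Int × Int)
  | [], _ => []
  | (chunk, positions, occurrences) :: rest, used =>
    let n := PySem.Str.len chunk
    if n > 0 && positions.any (fun p => pvCovered used p (p + n)) then
      pvBGo rest used
    else
      (chunk, positions, occurrences) ::
        pvBGo rest (if n > 0 then positions.foldl (fun iv p => pvAddSkip iv p (p + n)) used else used)

def find_non_overlapping_chunks_alt (chunks : List (String × List Int × Int)) : List (String × List Int × Int) :=
  pvBGo chunks []

-- ===== PRECONDITION & SPEC =====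
def Spec_find_non_overlapping_chunks (chunks : List (String × List Int × Int)) (out : List (String × List Int × Int)) : Prop := out = find_non_overlapping_chunks_alt chunks
instance (chunks : List (String × List Int × Int)) (out : List (String × List Int × Int)) : Decidable (Spec_find_non_overlapping_chunks chunks out) := by unfold Spec_find_non_overlapping_chunks; infer_instance

-- ===== CLAIM (what is proved, stated in full; the proofs are below) =====
def Claim_equal_find_non_overlapping_chunks : Prop := ∀ (chunks : List (String × List Int × Int)), Dom_find_non_overlapping_chunks chunks → Spec_find_non_overlapping_chunks chunks (find_non_overlapping_chunks chunks)

-- ===== LEMMAS AND PROOFS =====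

-- the set of integers covered by an interval list
def pvCov (iv : List (Int × Int)) (x : Int) : Prop := ∃ ab ∈ iv, ab.1 ≤ x ∧ x < ab.2

-- B's invariant on `used`: nonempty intervals, sorted, pairwise disjoint and non-touching
def pvChain : List (Int × Int) → Prop
  | [] => True
  | (a, b) :: t => a < b ∧ (∀ cd ∈ t, b < cd.1) ∧ pvChain t

lemma pvChain_mem_lt (iv : List (Int × Int)) (hc : pvChain iv) :
    ∀ ab ∈ iv, ab.1 < ab.2 := by
  induction iv with
  | nil => intro ab h; cases h
  | cons hd t ih =>
    obtain ⟨a, b⟩ := hd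
    obtain ⟨hab, _, hct⟩ := hc
    intro ab hm
    rcases List.mem_cons.mp hm with rfl | hm
    · exact hab
    · exact ih hct ab hm

-- the early-exiting scan decides interval overlap on a chain
lemma pvCovered_iff (p q : Int) (hpq : p < q) :
    ∀ iv : List (Int × Int), pvChain iv →
      (pvCovered iv p q = true ↔ ∃ ab ∈ iv, max ab.1 p < min ab.2 q) := by
  intro iv
  induction iv with
  | nil => intro _; simp [pvCovered]
  | cons hd t ih =>
    intro hc
    obtain ⟨a, b⟩ := hd
    obtain ⟨hab, hlt, hct⟩ := hc
    simp only [pvCovered]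
    by_cases h1 : q ≤ a
    · simp only [if_pos h1]
      constructor
      · intro h; cases h
      · rintro ⟨ab, hab', hov⟩
        rcases List.mem_cons.mp hab' with rfl | hmem
        · exfalso; simp at hov; omega
        · exfalso; have := hlt ab hmem; simp at hov; omega
    · simp only [if_neg h1]
      by_cases h2 : p < b
      · simp only [if_pos h2, true_iff]
        exact ⟨(a, b), List.mem_cons_self, by simp; omega⟩
      · simp only [if_neg h2]
        rw [ih hct]
        constructor
        · rintro ⟨ab, hm, hov⟩; exact ⟨ab, List.mem_cons_of_mem _ hm, hov⟩
        · rintro ⟨ab, hm, hov⟩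
          rcases List.mem_cons.mp hm with rfl | hm
          · exfalso; simp at hov; omega
          · exact ⟨ab, hm, hov⟩

-- the merge phase of _add: chain preserved, coverage gains exactly [p, q)
lemma pvMerge_spec :
    ∀ (iv : List (Int × Int)) (p q : Int), pvChain iv → p < q →
      (∀ ab ∈ iv, p ≤ ab.2) →
      pvChain (pvAddMerge iv p q) ∧
      (∀ x, pvCov (pvAddMerge iv p q) x ↔ (p ≤ x ∧ x < q) ∨ pvCov iv x) ∧
      (∀ ab ∈ pvAddMerge iv p q, p ≤ ab.1 ∨ ∃ cd ∈ iv, cd.1 ≤ ab.1) := by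
  intro iv
  induction iv with
  | nil =>
    intro p q _ hpq _
    refine ⟨⟨hpq, by simp, trivial⟩, ?_, by simp [pvAddMerge]⟩
    intro x; simp [pvAddMerge, pvCov]
  | cons hd t ih =>
    intro p q hc hpq hpb
    obtain ⟨a, b⟩ := hd
    obtain ⟨hab, hlt, hct⟩ := hc
    by_cases h1 : a ≤ q
    · have hpb' : ∀ ab ∈ t, min p a ≤ ab.2 := by
        intro ab hm; have := hlt ab hm
        have h2 := hpb ab (List.mem_cons_of_mem _ hm); omega
      have hb : p ≤ b := hpb (a, b) List.mem_cons_self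
      obtain ⟨ihc, ihcov, ihbd⟩ := ih (min p a) (max q b) hct (by omega) hpb'
      simp only [pvAddMerge, if_pos h1]
      refine ⟨ihc, ?_, ?_⟩
      · intro x
        rw [ihcov x]
        simp only [pvCov, List.mem_cons]
        constructor
        · rintro (h | ⟨ab, hm, hx⟩)
          · by_cases hx : p ≤ x ∧ x < q
            · exact Or.inl hx
            · exact Or.inr ⟨(a, b), Or.inl rfl, by simp; omega⟩
          · exact Or.inr ⟨ab, Or.inr hm, hx⟩
        · rintro (h | ⟨ab, rfl | hm, hx⟩)
          · exact Or.inl ⟨by omega, by omega⟩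
          · exact Or.inl ⟨by simp at hx ⊢; omega, by simp at hx ⊢; omega⟩
          · exact Or.inr ⟨ab, hm, hx⟩
      · intro ab hm
        rcases ihbd ab hm with h | ⟨cd, hcd, hle⟩
        · by_cases h' : p ≤ a
          · exact Or.inl (by omega)
          · exact Or.inr ⟨(a, b), List.mem_cons_self, by simp at h ⊢; omega⟩
        · exact Or.inr ⟨cd, List.mem_cons_of_mem _ hcd, hle⟩
    · simp only [pvAddMerge, if_neg h1]
      refine ⟨⟨hpq, ?_, hab, hlt, hct⟩, ?_, ?_⟩
      · intro cd hm
        rcases List.mem_cons.mp hm with rfl | hm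
        · omega
        · have := hlt cd hm; omega
      · intro x
        simp only [pvCov, List.mem_cons]
        constructor
        · rintro ⟨ab, rfl | hm, hx⟩
          · exact Or.inl hx
          · exact Or.inr ⟨ab, hm, hx⟩
        · rintro (h | ⟨ab, hm, hx⟩)
          · exact ⟨(p, q), Or.inl rfl, h⟩
          · exact ⟨ab, Or.inr hm, hx⟩
      · intro ab hm
        rcases List.mem_cons.mp hm with rfl | hm
        · exact Or.inl le_rfl
        · exact Or.inr ⟨ab, hm, le_rfl⟩

-- _add as a whole: chain preserved, coverage gains exactly [p, q)
lemma pvAdd_spec :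
    ∀ (iv : List (Int × Int)) (p q : Int), pvChain iv → p < q →
      pvChain (pvAddSkip iv p q) ∧
      (∀ x, pvCov (pvAddSkip iv p q) x ↔ (p ≤ x ∧ x < q) ∨ pvCov iv x) ∧
      (∀ ab ∈ pvAddSkip iv p q, p ≤ ab.1 ∨ ∃ cd ∈ iv, cd.1 ≤ ab.1) := by
  intro iv
  induction iv with
  | nil =>
    intro p q _ hpq
    refine ⟨⟨hpq, by simp, trivial⟩, ?_, by simp [pvAddSkip]⟩
    intro x; simp [pvAddSkip, pvCov]
  | cons hd t ih =>
    intro p q hc hpq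
    obtain ⟨a, b⟩ := hd
    obtain ⟨hab, hlt, hct⟩ := hc
    by_cases h1 : b < p
    · obtain ⟨ihc, ihcov, ihbd⟩ := ih p q hct hpq
      simp only [pvAddSkip, if_pos h1]
      refine ⟨?_, ?_, ?_⟩
      · refine ⟨hab, ?_, ihc⟩
        intro cd hm
        rcases ihbd cd hm with h | ⟨cd', hcd', hle⟩
        · omega
        · have := hlt cd' hcd'; omega
      · intro x
        simp only [pvCov, List.mem_cons]
        constructor
        · rintro ⟨ab, rfl | hm, hx⟩
          · exact Or.inr ⟨(a, b), Or.inl rfl, hx⟩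
          · rcases (ihcov x).mp ⟨ab, hm, hx⟩ with h | ⟨ab', hm', hx'⟩
            · exact Or.inl h
            · exact Or.inr ⟨ab', Or.inr hm', hx'⟩
        · rintro (h | ⟨ab, rfl | hm, hx⟩)
          · obtain ⟨ab', hm', hx'⟩ := (ihcov x).mpr (Or.inl h)
            exact ⟨ab', Or.inr hm', hx'⟩
          · exact ⟨(a, b), Or.inl rfl, hx⟩
          · obtain ⟨ab', hm', hx'⟩ := (ihcov x).mpr (Or.inr ⟨ab, hm, hx⟩)
            exact ⟨ab', Or.inr hm', hx'⟩
      · intro ab hm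
        rcases List.mem_cons.mp hm with rfl | hm
        · exact Or.inr ⟨(a, b), List.mem_cons_self, le_rfl⟩
        · rcases ihbd ab hm with h | ⟨cd, hcd, hle⟩
          · exact Or.inl h
          · exact Or.inr ⟨cd, List.mem_cons_of_mem _ hcd, hle⟩
    · simp only [pvAddSkip, if_neg h1]
      refine pvMerge_spec ((a, b) :: t) p q ⟨hab, hlt, hct⟩ hpq ?_
      intro ab hm
      rcases List.mem_cons.mp hm with rfl | hm
      · omega
      · have h2 := hlt ab hm
        have h3 := pvChain_mem_lt t hct ab hm
        omega

-- relation between A's used-positions set and B's interval chain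
def pvRel (s : PySem.Set Int) (iv : List (Int × Int)) : Prop :=
  pvChain iv ∧ ∀ x : Int, x ∈ s ↔ pvCov iv x

-- the two overlap tests agree under pvRel
lemma pv_test_eq (s : PySem.Set Int) (iv : List (Int × Int)) (h : pvRel s iv)
    (positions : List Int) (n : Int) :
    ((PySem.Set.ofList (positions.map (fun pos => PySem.List.pyRange pos (pos + n) 1))).any
        (fun ps => ps.any (fun pos => PySem.Set.contains s pos)))
      = (decide (n > 0) && positions.any (fun p => pvCovered iv p (p + n))) := by
  obtain ⟨hc, hmem⟩ := h
  by_cases hn : n > 0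
  · simp only [hn, decide_true, Bool.true_and]
    rw [Bool.eq_iff_iff]
    simp only [List.any_eq_true, PySem.Set.contains_iff, PySem.Set.mem_ofList, List.mem_map]
    constructor
    · rintro ⟨ps, ⟨p, hp, rfl⟩, x, hx, hxs⟩
      refine ⟨p, hp, ?_⟩
      rw [pvCovered_iff p (p + n) (by omega) iv hc]
      rw [PySem.List.mem_pyRange_one] at hx
      obtain ⟨ab, hab, h1, h2⟩ := (hmem x).mp hxs
      exact ⟨ab, hab, by omega⟩
    · rintro ⟨p, hp, hcov⟩
      rw [pvCovered_iff p (p + n) (by omega) iv hc] at hcov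
      obtain ⟨ab, hab, hov⟩ := hcov
      refine ⟨_, ⟨p, hp, rfl⟩, max ab.1 p, ?_, (hmem _).mpr ⟨ab, hab, by omega⟩⟩
      rw [PySem.List.mem_pyRange_one]; omega
  · simp only [hn, decide_false, Bool.false_and]
    simp only [List.any_eq_false, PySem.Set.mem_ofList, List.mem_map]
    rintro ps ⟨p, hp, rfl⟩ hany
    simp only [List.any_eq_true] at hany
    obtain ⟨x, hx, -⟩ := hany
    rw [PySem.List.mem_pyRange_one] at hx
    omega

-- updating both representations preserves pvRel
lemma pvRel_update (s : PySem.Set Int) (iv : List (Int × Int)) (h : pvRel s iv)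
    (positions : List Int) (n : Int) :
    pvRel (PySem.Set.update s
        (PySem.Set.ofList (positions.map (fun pos => PySem.List.pyRange pos (pos + n) 1))).flatten)
      (if n > 0 then positions.foldl (fun iv p => pvAddSkip iv p (p + n)) iv else iv) := by
  have hfold : n > 0 → ∀ iv, pvChain iv →
      pvChain (positions.foldl (fun iv p => pvAddSkip iv p (p + n)) iv) ∧
      (∀ x, pvCov (positions.foldl (fun iv p => pvAddSkip iv p (p + n)) iv) x ↔
        pvCov iv x ∨ ∃ p ∈ positions, p ≤ x ∧ x < p + n) := by
    intro hn
    induction positions with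
    | nil =>
      intro iv hc
      refine ⟨hc, fun x => ?_⟩
      simp
    | cons p ps ih =>
      intro iv hc
      obtain ⟨hc', hcov', _⟩ := pvAdd_spec iv p (p + n) hc (by omega)
      obtain ⟨ihc, ihcov⟩ := ih _ hc'
      refine ⟨ihc, ?_⟩
      intro x
      rw [List.foldl_cons, ihcov x, hcov' x]
      simp only [List.mem_cons]
      constructor
      · rintro ((h | h) | ⟨p', hp', hx⟩)
        · exact Or.inr ⟨p, Or.inl rfl, h⟩
        · exact Or.inl h
        · exact Or.inr ⟨p', Or.inr hp', hx⟩
      · rintro (h | ⟨p', rfl | hp', hx⟩)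
        · exact Or.inl (Or.inr h)
        · exact Or.inl (Or.inl hx)
        · exact Or.inr ⟨p', hp', hx⟩
  obtain ⟨hc, hmem⟩ := h
  have hflat : ∀ x : Int,
      (x ∈ (PySem.Set.ofList (positions.map (fun pos => PySem.List.pyRange pos (pos + n) 1))).flatten)
        ↔ ∃ p ∈ positions, p ≤ x ∧ x < p + n := by
    intro x
    simp only [List.mem_flatten, PySem.Set.mem_ofList, List.mem_map]
    constructor
    · rintro ⟨ps, ⟨p, hp, rfl⟩, hx⟩
      rw [PySem.List.mem_pyRange_one] at hx
      exact ⟨p, hp, hx⟩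
    · rintro ⟨p, hp, hx⟩
      exact ⟨_, ⟨p, hp, rfl⟩, by rw [PySem.List.mem_pyRange_one]; omega⟩
  by_cases hn : n > 0
  · rw [if_pos hn]
    obtain ⟨hc', hcov'⟩ := hfold hn iv hc
    show pvChain _ ∧ _
    refine ⟨hc', fun x => ?_⟩
    rw [PySem.Set.mem_update, hflat x, hcov' x, hmem x]
  · rw [if_neg hn]
    show pvChain _ ∧ _
    refine ⟨hc, fun x => ?_⟩
    rw [PySem.Set.mem_update, hflat x, hmem x]
    constructor
    · rintro (h | ⟨p, _, hx⟩)
      · exact h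
      · omega
    · exact Or.inl

-- main loop invariant: A's fold produces acc ++ B's recursion, given pvRel
lemma pv_fold_eq (chunks : List (String × List Int × Int))
    (acc : List (String × List Int × Int)) (s : PySem.Set Int) (iv : List (Int × Int))
    (h : pvRel s iv) :
    (chunks.foldl pvAStep (acc, s)).1 = acc ++ pvBGo chunks iv := by
  induction chunks generalizing acc s iv with
  | nil => simp [pvBGo]
  | cons c rest ih =>
    obtain ⟨chunk, positions, occurrences⟩ := c
    have htest := pv_test_eq s iv h positions (PySem.Str.len chunk)
    have hstep : pvAStep (acc, s) (chunk, positions, occurrences) =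
        (if ((PySem.Set.ofList (positions.map
              (fun pos => PySem.List.pyRange pos (pos + PySem.Str.len chunk) 1))).any
            (fun ps => ps.any (fun pos => PySem.Set.contains s pos))) then (acc, s)
         else (acc ++ [(chunk, positions, occurrences)],
           PySem.Set.update s (PySem.Set.ofList (positions.map
             (fun pos => PySem.List.pyRange pos (pos + PySem.Str.len chunk) 1))).flatten)) := rfl
    simp only [List.foldl_cons, pvBGo]
    rw [hstep, htest]
    by_cases hc : (decide (PySem.Str.len chunk > 0) &&
        positions.any (fun p => pvCovered iv p (p + PySem.Str.len chunk))) = true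
    · rw [if_pos hc, if_pos hc]; exact ih acc s iv h
    · rw [if_neg hc, if_neg hc]
      rw [ih (acc ++ [(chunk, positions, occurrences)]) _ _
        (pvRel_update s iv h positions (PySem.Str.len chunk))]
      simp

-- ===== VERDICT (by name: the statement is the Claim_ definition above) =====
theorem find_non_overlapping_chunks_spec : Claim_equal_find_non_overlapping_chunks := by
  intro chunks _
  unfold Spec_find_non_overlapping_chunks find_non_overlapping_chunks find_non_overlapping_chunks_alt
  by_cases h : chunks = []
  · subst h; rfl
  · rw [if_neg h]
    exact pv_fold_eq chunks [] PySem.Set.empty []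
      (by refine ⟨trivial, fun x => ?_⟩; simp [PySem.Set.empty, pvCov] : pvRel PySem.Set.empty [])
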